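-- pv_equiv track=rewrite | github.com/acastango/pokecrystal-cs | tools/gen_collision.py | blk_to_collision
-- ===== SOURCE A (Python) =====
-- def blk_to_collision(blk_data, blk_w, blk_h, tilecoll_table):
--     """
--     Expand (blk_w × blk_h) blocks → (blk_w*2 × blk_h*2) tile collision array.
--     Each block → 4 tiles: NW, NE, SW, SE (row-major in tile coords).
--     """
--     tw = blk_w * 2  # tile width
--     th = blk_h * 2  # tile height
--     out = [0] * (tw * th)
--     for by in range(blk_h):
--         for bx in range(blk_w):
--             mt = blk_data[by * blk_w + bx]
--             if mt < len(tilecoll_table):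
--                 nw, ne, sw, se = tilecoll_table[mt]
--             else:
--                 nw = ne = sw = se = 0x07  # unknown metatile → wall
--             tx, ty = bx * 2, by * 2
--             out[ty       * tw + tx    ] = nw
--             out[ty       * tw + tx + 1] = ne
--             out[(ty + 1) * tw + tx    ] = sw
--             out[(ty + 1) * tw + tx + 1] = se
--     return out, tw, th
-- ===== SOURCE B (Python) =====
-- def blk_to_collision(blk_data, blk_w, blk_h, tilecoll_table):
--     """
--     Expand (blk_w x blk_h) blocks -> (blk_w*2 x blk_h*2) tile collision array,
--     built row-pair by row-pair as concatenated lists (no preallocated scatter).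
--     """
--     tw = blk_w * 2
--     th = blk_h * 2
--     out = []
--     for by in range(blk_h):
--         north = []
--         south = []
--         for bx in range(blk_w):
--             mt = blk_data[by * blk_w + bx]
--             if mt < len(tilecoll_table):
--                 nw, ne, sw, se = tilecoll_table[mt]
--             else:
--                 nw = ne = sw = se = 0x07
--             north += [nw, ne]
--             south += [sw, se]
--         out.extend(north)
--         out.extend(south)
--     return out, tw, th
-- ===== Notes on version B (the rewrite author's own statement) =====
-- stated objective: alternative
-- what changed: B builds the tile array as concatenated north/south row lists extended block by block, instead of preallocating a flat zero array and scattering the four tile values into computed indices.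
-- outside the precondition, e.g. on blk_to_collision([0, 1], -1, -1, []): A returns ([0, 0, 0, 0], -2, -2), B returns ([], -2, -2)
import Mathlib
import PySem

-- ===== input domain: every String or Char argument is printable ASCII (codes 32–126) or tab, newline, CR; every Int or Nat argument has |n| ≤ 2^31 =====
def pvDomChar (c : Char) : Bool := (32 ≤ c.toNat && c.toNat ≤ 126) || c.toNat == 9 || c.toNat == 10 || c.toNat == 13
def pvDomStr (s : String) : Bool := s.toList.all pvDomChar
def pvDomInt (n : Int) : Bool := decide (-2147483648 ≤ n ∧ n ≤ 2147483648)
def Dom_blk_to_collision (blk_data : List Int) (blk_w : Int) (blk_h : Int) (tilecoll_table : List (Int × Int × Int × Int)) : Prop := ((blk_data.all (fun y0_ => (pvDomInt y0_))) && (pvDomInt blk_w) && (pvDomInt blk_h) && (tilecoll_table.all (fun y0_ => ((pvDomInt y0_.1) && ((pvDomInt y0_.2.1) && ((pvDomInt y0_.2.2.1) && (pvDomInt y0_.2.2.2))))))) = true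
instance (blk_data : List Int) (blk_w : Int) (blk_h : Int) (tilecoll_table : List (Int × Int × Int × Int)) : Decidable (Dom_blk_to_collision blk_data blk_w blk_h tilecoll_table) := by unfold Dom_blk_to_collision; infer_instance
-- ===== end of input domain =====

-- B builds the tile rows as concatenated lists (row by row) instead of scattering
-- into a preallocated flat array; same cost, a different construction (objective: alternative).

-- ===== PORT A =====
def blk_to_collision (blk_data : List Int) (blk_w : Int) (blk_h : Int) (tilecoll_table : List (Int × Int × Int × Int)) : List Int × Int × Int :=
  let tw := blk_w * 2
  let th := blk_h * 2
  let out := PySem.List.pyRepeat [(0 : Int)] (tw * th)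
  let out := (PySem.List.pyRange 0 blk_h 1).foldl (fun out by_ =>
    (PySem.List.pyRange 0 blk_w 1).foldl (fun out bx =>
      let mt := PySem.List.pyGetD blk_data (by_ * blk_w + bx) 0
      let q := if mt < PySem.List.len tilecoll_table
               then PySem.List.pyGetD tilecoll_table mt (7, 7, 7, 7)
               else (7, 7, 7, 7)
      let tx := bx * 2
      let ty := by_ * 2
      let out := PySem.List.pySetD out (ty * tw + tx) q.1
      let out := PySem.List.pySetD out (ty * tw + tx + 1) q.2.1
      let out := PySem.List.pySetD out ((ty + 1) * tw + tx) q.2.2.1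
      PySem.List.pySetD out ((ty + 1) * tw + tx + 1) q.2.2.2) out) out
  (out, tw, th)

-- ===== PORT B =====
def blk_to_collision_alt (blk_data : List Int) (blk_w : Int) (blk_h : Int) (tilecoll_table : List (Int × Int × Int × Int)) : List Int × Int × Int :=
  let tw := blk_w * 2
  let th := blk_h * 2
  let out := (PySem.List.pyRange 0 blk_h 1).foldl (fun out by_ =>
    let ns := (PySem.List.pyRange 0 blk_w 1).foldl (fun (ns : List Int × List Int) bx =>
      let mt := PySem.List.pyGetD blk_data (by_ * blk_w + bx) 0
      let q := if mt < PySem.List.len tilecoll_table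
               then PySem.List.pyGetD tilecoll_table mt (7, 7, 7, 7)
               else (7, 7, 7, 7)
      (ns.1 ++ [q.1, q.2.1], ns.2 ++ [q.2.2.1, q.2.2.2])) ([], [])
    out ++ ns.1 ++ ns.2) []
  (out, tw, th)

-- ===== PRECONDITION & SPEC =====
-- Pre_ excludes (a) inputs where A raises an IndexError (blk_data shorter than
-- blk_w*blk_h, or a metatile id below -len(tilecoll_table)), and (b) the degenerate
-- corner blk_w < 0 ∧ blk_h < 0: with both dimensions negative no grid is specified,
-- and A's preallocated [0]*(4*blk_w*blk_h) zeros and B's empty grid are equally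
-- defensible values for it.
def Pre_blk_to_collision (blk_data : List Int) (blk_w : Int) (blk_h : Int) (tilecoll_table : List (Int × Int × Int × Int)) : Prop :=
  ¬(blk_w < 0 ∧ blk_h < 0) ∧
  (0 < blk_w → 0 < blk_h →
    blk_w * blk_h ≤ (blk_data.length : Int) ∧
    ∀ x ∈ blk_data.take (blk_w * blk_h).toNat,
      x < (tilecoll_table.length : Int) → -(tilecoll_table.length : Int) ≤ x)
instance (blk_data : List Int) (blk_w : Int) (blk_h : Int) (tilecoll_table : List (Int × Int × Int × Int)) : Decidable (Pre_blk_to_collision blk_data blk_w blk_h tilecoll_table) := by unfold Pre_blk_to_collision; infer_instance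

def pvWitness_blk_to_collision : List Int × Int × Int × (List (Int × Int × Int × Int)) :=
  ([0, 1, 7, 1], 2, 2, [(1, 2, 3, 4), (5, 6, 7, 8)])

def Spec_blk_to_collision (blk_data : List Int) (blk_w : Int) (blk_h : Int) (tilecoll_table : List (Int × Int × Int × Int)) (out : List Int × Int × Int) : Prop := out = blk_to_collision_alt blk_data blk_w blk_h tilecoll_table
instance (blk_data : List Int) (blk_w : Int) (blk_h : Int) (tilecoll_table : List (Int × Int × Int × Int)) (out : List Int × Int × Int) : Decidable (Spec_blk_to_collision blk_data blk_w blk_h tilecoll_table out) := by unfold Spec_blk_to_collision; infer_instance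

-- ===== CLAIM (what is proved, stated in full; the proofs are below) =====
def Claim_equal_blk_to_collision : Prop := ∀ (blk_data : List Int) (blk_w : Int) (blk_h : Int) (tilecoll_table : List (Int × Int × Int × Int)), Dom_blk_to_collision blk_data blk_w blk_h tilecoll_table → Pre_blk_to_collision blk_data blk_w blk_h tilecoll_table → Spec_blk_to_collision blk_data blk_w blk_h tilecoll_table (blk_to_collision blk_data blk_w blk_h tilecoll_table)

-- ===== LEMMAS AND PROOFS =====

-- the (nw, ne, sw, se) quadruple both programs read for flat block index i
def pvQuad (d : List Int) (tbl : List (Int × Int × Int × Int)) (i : Int) : Int × Int × Int × Int :=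
  let mt := PySem.List.pyGetD d i 0
  if mt < PySem.List.len tbl then PySem.List.pyGetD tbl mt (7, 7, 7, 7) else (7, 7, 7, 7)

-- north / south tile half-rows of block row by_, for block columns bx ∈ [j, w)
def pvNseg (d : List Int) (tbl : List (Int × Int × Int × Int)) (w by_ j : Int) : List Int :=
  (PySem.List.pyRange j w 1).flatMap (fun bx => [(pvQuad d tbl (by_ * w + bx)).1, (pvQuad d tbl (by_ * w + bx)).2.1])
def pvSseg (d : List Int) (tbl : List (Int × Int × Int × Int)) (w by_ j : Int) : List Int :=
  (PySem.List.pyRange j w 1).flatMap (fun bx => [(pvQuad d tbl (by_ * w + bx)).2.2.1, (pvQuad d tbl (by_ * w + bx)).2.2.2])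

-- the expanded collision rows for block rows by_ ∈ [r, h)
def pvRows (d : List Int) (tbl : List (Int × Int × Int × Int)) (w r h : Int) : List Int :=
  (PySem.List.pyRange r h 1).flatMap (fun by_ => pvNseg d tbl w by_ 0 ++ pvSseg d tbl w by_ 0)

-- A's inner-loop step, named (definitionally the inner lambda of blk_to_collision)
def pvStepA (d : List Int) (tbl : List (Int × Int × Int × Int)) (blk_w tw by_ : Int) (out : List Int) (bx : Int) : List Int :=
  let mt := PySem.List.pyGetD d (by_ * blk_w + bx) 0
  let q := if mt < PySem.List.len tbl
           then PySem.List.pyGetD tbl mt (7, 7, 7, 7)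
           else (7, 7, 7, 7)
  let tx := bx * 2
  let ty := by_ * 2
  let out := PySem.List.pySetD out (ty * tw + tx) q.1
  let out := PySem.List.pySetD out (ty * tw + tx + 1) q.2.1
  let out := PySem.List.pySetD out ((ty + 1) * tw + tx) q.2.2.1
  PySem.List.pySetD out ((ty + 1) * tw + tx + 1) q.2.2.2

theorem pvLen2 {α β : Type} (f g : α → β) (l : List α) :
    (l.flatMap (fun x => [f x, g x])).length = 2 * l.length := by
  induction l with
  | nil => simp
  | cons a t ih => simp [ih]; omega

theorem pvLenNseg (d : List Int) (tbl : List (Int × Int × Int × Int)) (w by_ : Int) (_hw : 0 ≤ w) :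
    (pvNseg d tbl w by_ 0).length = 2 * w.toNat := by
  unfold pvNseg
  rw [pvLen2]
  simp [PySem.List.length_pyRange_one]

theorem pvLenSseg (d : List Int) (tbl : List (Int × Int × Int × Int)) (w by_ : Int) (_hw : 0 ≤ w) :
    (pvSseg d tbl w by_ 0).length = 2 * w.toNat := by
  unfold pvSseg
  rw [pvLen2]
  simp [PySem.List.length_pyRange_one]

theorem pvBrowGen (d : List Int) (tbl : List (Int × Int × Int × Int)) (bw by_ : Int) :
    ∀ (l : List Int) (a b : List Int),
    l.foldl (fun (ns : List Int × List Int) bx =>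
      let mt := PySem.List.pyGetD d (by_ * bw + bx) 0
      let q := if mt < PySem.List.len tbl then PySem.List.pyGetD tbl mt (7, 7, 7, 7) else (7, 7, 7, 7)
      (ns.1 ++ [q.1, q.2.1], ns.2 ++ [q.2.2.1, q.2.2.2])) (a, b)
    = (a ++ l.flatMap (fun bx => [(pvQuad d tbl (by_ * bw + bx)).1, (pvQuad d tbl (by_ * bw + bx)).2.1]),
       b ++ l.flatMap (fun bx => [(pvQuad d tbl (by_ * bw + bx)).2.2.1, (pvQuad d tbl (by_ * bw + bx)).2.2.2])) := by
  intro l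
  induction l with
  | nil => intro a b; simp
  | cons x t ih =>
    intro a b
    simp only [List.foldl_cons, List.flatMap_cons]
    rw [ih]
    simp [pvQuad, List.append_assoc]




theorem pvBoutGen (d : List Int) (tbl : List (Int × Int × Int × Int)) (bw : Int) :
    ∀ (l : List Int) (acc : List Int),
    l.foldl (fun out by_ =>
      let ns := (PySem.List.pyRange 0 bw 1).foldl (fun (ns : List Int × List Int) bx =>
        let mt := PySem.List.pyGetD d (by_ * bw + bx) 0
        let q := if mt < PySem.List.len tbl then PySem.List.pyGetD tbl mt (7, 7, 7, 7) else (7, 7, 7, 7)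
        (ns.1 ++ [q.1, q.2.1], ns.2 ++ [q.2.2.1, q.2.2.2])) ([], [])
      out ++ ns.1 ++ ns.2) acc
    = acc ++ l.flatMap (fun by_ => pvNseg d tbl bw by_ 0 ++ pvSseg d tbl bw by_ 0) := by
  intro l
  induction l with
  | nil => intro acc; simp
  | cons x t ih =>
    intro acc
    rw [List.foldl_cons, List.flatMap_cons, ih,
        pvBrowGen d tbl bw x (PySem.List.pyRange 0 bw 1) [] []]
    simp [pvNseg, pvSseg, List.append_assoc]

theorem pvB_eq (d : List Int) (bw bh : Int) (tbl : List (Int × Int × Int × Int)) :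
    blk_to_collision_alt d bw bh tbl = (pvRows d tbl bw 0 bh, bw * 2, bh * 2) := by
  unfold blk_to_collision_alt pvRows
  refine congrArg (fun o => (o, bw * 2, bh * 2)) ?_
  rw [pvBoutGen d tbl bw (PySem.List.pyRange 0 bh 1) []]
  simp

theorem pvSetAt {α : Type} (l : List α) (x : α) (r : List α) (n : Nat) (v : α) (h : n = l.length) :
    (l ++ x :: r).set n v = l ++ v :: r := by
  subst h
  rw [List.set_append]
  simp

theorem pvNseg_cons (d : List Int) (tbl : List (Int × Int × Int × Int)) (w k j : Int) (hjw : j < w) :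
    pvNseg d tbl w k j = (pvQuad d tbl (k * w + j)).1 :: (pvQuad d tbl (k * w + j)).2.1 :: pvNseg d tbl w k (j + 1) := by
  unfold pvNseg
  rw [PySem.List.pyRange_one_cons hjw]
  simp

theorem pvSseg_cons (d : List Int) (tbl : List (Int × Int × Int × Int)) (w k j : Int) (hjw : j < w) :
    pvSseg d tbl w k j = (pvQuad d tbl (k * w + j)).2.2.1 :: (pvQuad d tbl (k * w + j)).2.2.2 :: pvSseg d tbl w k (j + 1) := by
  unfold pvSseg
  rw [PySem.List.pyRange_one_cons hjw]
  simp


theorem pvSet2 {α : Type} (l : List α) (x y : α) (r : List α) (n : Nat) (v v' : α) (h : n = l.length) :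
    ((l ++ x :: y :: r).set n v).set (n + 1) v' = l ++ v :: v' :: r := by
  rw [pvSetAt l x (y :: r) n v h]
  have d : l ++ v :: y :: r = (l ++ [v]) ++ y :: r := by simp
  rw [d, pvSetAt (l ++ [v]) y r (n + 1) v' (by simp [h])]
  simp

theorem pvScatter {α : Type} (P M Q R : List α) (n1 n2 s1 s2 a b c e : α)
    (i1 i2 : Nat) (h1 : i1 = P.length) (h2 : i2 = P.length + 2 + M.length + Q.length) :
    ((((P ++ n1 :: n2 :: (M ++ (Q ++ s1 :: s2 :: R))).set i1 a).set (i1 + 1) b).set i2 c).set (i2 + 1) e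
    = P ++ a :: b :: (M ++ (Q ++ c :: e :: R)) := by
  rw [pvSet2 P n1 n2 (M ++ (Q ++ s1 :: s2 :: R)) i1 a b h1]
  have d : P ++ a :: b :: (M ++ (Q ++ s1 :: s2 :: R)) = (P ++ a :: b :: M ++ Q) ++ s1 :: s2 :: R := by
    simp [List.append_assoc]
  rw [d, pvSet2 (P ++ a :: b :: M ++ Q) s1 s2 R i2 c e (by simp; omega)]
  simp [List.append_assoc]

theorem pvInner (d : List Int) (tbl : List (Int × Int × Int × Int)) (w k : Nat) :
    ∀ (m j : Nat), j + m = w →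
    ∀ (pre N restN S restS T : List Int),
      pre.length = 4 * w * k → N.length = 2 * j → restN.length = 2 * m →
      S.length = 2 * j → restS.length = 2 * m →
      (PySem.List.pyRange (j : Int) (w : Int) 1).foldl (pvStepA d tbl (w : Int) ((w : Int) * 2) (k : Int))
          (pre ++ N ++ restN ++ S ++ restS ++ T)
      = pre ++ (N ++ pvNseg d tbl (w : Int) (k : Int) (j : Int)) ++ (S ++ pvSseg d tbl (w : Int) (k : Int) (j : Int)) ++ T := by
  intro m
  induction m with
  | zero =>
    intro j hj pre N restN S restS T hpre hN hrN hS hrS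
    have hjw : (w : Int) ≤ (j : Int) := by omega
    obtain rfl : restN = [] := List.length_eq_zero_iff.mp (by omega)
    obtain rfl : restS = [] := List.length_eq_zero_iff.mp (by omega)
    rw [PySem.List.pyRange_one_eq_nil hjw]
    unfold pvNseg pvSseg
    rw [PySem.List.pyRange_one_eq_nil hjw]
    simp
  | succ m ih =>
    intro j hj pre N restN S restS T hpre hN hrN hS hrS
    have hjw : (j : Int) < (w : Int) := by omega
    obtain ⟨n1, n2, restN', rfl⟩ : ∃ a b t, restN = a :: b :: t := by
      match restN, hrN with
      | a :: b :: t, _ => exact ⟨a, b, t, rfl⟩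
    obtain ⟨s1, s2, restS', rfl⟩ : ∃ a b t, restS = a :: b :: t := by
      match restS, hrS with
      | a :: b :: t, _ => exact ⟨a, b, t, rfl⟩
    have hrN' : restN'.length = 2 * m := by simp at hrN; omega
    have hrS' : restS'.length = 2 * m := by simp at hrS; omega
    rw [PySem.List.pyRange_one_cons hjw, List.foldl_cons]
    have e1 : (k : Int) * 2 * ((w : Int) * 2) + (j : Int) * 2 = ((4 * w * k + 2 * j : Nat) : Int) := by
      push_cast; ring
    have e2 : ((4 * w * k + 2 * j : Nat) : Int) + 1 = ((4 * w * k + 2 * j + 1 : Nat) : Int) := by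
      push_cast; ring
    have e3 : ((k : Int) * 2 + 1) * ((w : Int) * 2) + (j : Int) * 2 = ((4 * w * k + 2 * w + 2 * j : Nat) : Int) := by
      push_cast; ring
    have e4 : ((4 * w * k + 2 * w + 2 * j : Nat) : Int) + 1 = ((4 * w * k + 2 * w + 2 * j + 1 : Nat) : Int) := by
      push_cast; ring
    have hstate : pvStepA d tbl (w : Int) ((w : Int) * 2) (k : Int)
        (pre ++ N ++ (n1 :: n2 :: restN') ++ S ++ (s1 :: s2 :: restS') ++ T) (j : Int)
        = pre ++ (N ++ [(pvQuad d tbl ((k : Int) * (w : Int) + (j : Int))).1,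
                        (pvQuad d tbl ((k : Int) * (w : Int) + (j : Int))).2.1]) ++ restN'
          ++ (S ++ [(pvQuad d tbl ((k : Int) * (w : Int) + (j : Int))).2.2.1,
                    (pvQuad d tbl ((k : Int) * (w : Int) + (j : Int))).2.2.2]) ++ restS' ++ T := by
      show PySem.List.pySetD (PySem.List.pySetD (PySem.List.pySetD (PySem.List.pySetD
            (pre ++ N ++ (n1 :: n2 :: restN') ++ S ++ (s1 :: s2 :: restS') ++ T)
            ((k : Int) * 2 * ((w : Int) * 2) + (j : Int) * 2)
            (pvQuad d tbl ((k : Int) * (w : Int) + (j : Int))).1)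
            ((k : Int) * 2 * ((w : Int) * 2) + (j : Int) * 2 + 1)
            (pvQuad d tbl ((k : Int) * (w : Int) + (j : Int))).2.1)
            (((k : Int) * 2 + 1) * ((w : Int) * 2) + (j : Int) * 2)
            (pvQuad d tbl ((k : Int) * (w : Int) + (j : Int))).2.2.1)
            (((k : Int) * 2 + 1) * ((w : Int) * 2) + (j : Int) * 2 + 1)
            (pvQuad d tbl ((k : Int) * (w : Int) + (j : Int))).2.2.2 = _
      rw [e1, e3, e2, e4, PySem.List.pySetD_natCast, PySem.List.pySetD_natCast,
          PySem.List.pySetD_natCast, PySem.List.pySetD_natCast]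
      have dgrp : pre ++ N ++ (n1 :: n2 :: restN') ++ S ++ (s1 :: s2 :: restS') ++ T
          = (pre ++ N) ++ n1 :: n2 :: (restN' ++ (S ++ s1 :: s2 :: (restS' ++ T))) := by
        simp [List.append_assoc]
      rw [dgrp, pvScatter (pre ++ N) restN' S (restS' ++ T) n1 n2 s1 s2 _ _ _ _
            (4 * w * k + 2 * j) (4 * w * k + 2 * w + 2 * j)
            (by simp [hpre, hN]) (by simp [hpre, hN, hS, hrN']; omega)]
      simp [List.append_assoc]
    rw [hstate]
    have hc : (j : Int) + 1 = ((j + 1 : Nat) : Int) := by push_cast; ring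
    rw [hc, ih (j + 1) (by omega) pre
          (N ++ [(pvQuad d tbl ((k : Int) * (w : Int) + (j : Int))).1,
                 (pvQuad d tbl ((k : Int) * (w : Int) + (j : Int))).2.1]) restN'
          (S ++ [(pvQuad d tbl ((k : Int) * (w : Int) + (j : Int))).2.2.1,
                 (pvQuad d tbl ((k : Int) * (w : Int) + (j : Int))).2.2.2]) restS' T
          hpre (by simp [hN]; omega) hrN' (by simp [hS]; omega) hrS']
    rw [pvNseg_cons d tbl (w : Int) (k : Int) (j : Int) hjw,
        pvSseg_cons d tbl (w : Int) (k : Int) (j : Int) hjw]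
    push_cast
    simp [List.append_assoc]

theorem pvRows_cons (d : List Int) (tbl : List (Int × Int × Int × Int)) (w r h : Int) (hrh : r < h) :
    pvRows d tbl w r h = (pvNseg d tbl w r 0 ++ pvSseg d tbl w r 0) ++ pvRows d tbl w (r + 1) h := by
  unfold pvRows
  rw [PySem.List.pyRange_one_cons hrh]
  simp

theorem pvOuter (d : List Int) (tbl : List (Int × Int × Int × Int)) (w h : Nat) :
    ∀ (m r : Nat), r + m = h →
    ∀ (pre : List Int), pre.length = 4 * w * r →
      (PySem.List.pyRange (r : Int) (h : Int) 1).foldl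
          (fun out by_ => (PySem.List.pyRange 0 (w : Int) 1).foldl (pvStepA d tbl (w : Int) ((w : Int) * 2) by_) out)
          (pre ++ List.replicate (4 * w * m) 0)
      = pre ++ pvRows d tbl (w : Int) (r : Int) (h : Int) := by
  intro m
  induction m with
  | zero =>
    intro r hr pre hpre
    have hrh : (h : Int) ≤ (r : Int) := by omega
    rw [PySem.List.pyRange_one_eq_nil hrh]
    unfold pvRows
    rw [PySem.List.pyRange_one_eq_nil hrh]
    simp
  | succ m ih =>
    intro r hr pre hpre
    have hrh : (r : Int) < (h : Int) := by omega
    rw [PySem.List.pyRange_one_cons hrh, List.foldl_cons]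
    have hsplit : pre ++ List.replicate (4 * w * (m + 1)) (0 : Int)
        = pre ++ [] ++ List.replicate (2 * w) 0 ++ [] ++ List.replicate (2 * w) 0 ++ List.replicate (4 * w * m) 0 := by
      rw [show 4 * w * (m + 1) = 2 * w + 2 * w + 4 * w * m by ring, List.replicate_add, List.replicate_add]
      simp [List.append_assoc]
    rw [hsplit]
    have hin := pvInner d tbl w r w 0 (by omega) pre [] (List.replicate (2 * w) 0) []
      (List.replicate (2 * w) 0) (List.replicate (4 * w * m) 0) hpre (by simp) (by simp) (by simp) (by simp)
    simp only [Nat.cast_zero] at hin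
    rw [hin]
    have hre : pre ++ ([] ++ pvNseg d tbl (w : Int) (r : Int) 0) ++ ([] ++ pvSseg d tbl (w : Int) (r : Int) 0)
          ++ List.replicate (4 * w * m) (0 : Int)
        = (pre ++ pvNseg d tbl (w : Int) (r : Int) 0 ++ pvSseg d tbl (w : Int) (r : Int) 0)
          ++ List.replicate (4 * w * m) 0 := by
      simp [List.append_assoc]
    rw [hre]
    have hc : (r : Int) + 1 = ((r + 1 : Nat) : Int) := by push_cast; ring
    rw [hc, ih (r + 1) (by omega) (pre ++ pvNseg d tbl (w : Int) (r : Int) 0 ++ pvSseg d tbl (w : Int) (r : Int) 0)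
          (by simp [pvLenNseg d tbl (w : Int) (r : Int) (by positivity),
                    pvLenSseg d tbl (w : Int) (r : Int) (by positivity), hpre]; ring)]
    rw [pvRows_cons d tbl (w : Int) (r : Int) (h : Int) hrh]
    push_cast
    simp [List.append_assoc]

-- A's result in closed form on the positive-dimensions case
theorem pvA_eq_pos (d : List Int) (bw bh : Int) (tbl : List (Int × Int × Int × Int))
    (hw : 0 < bw) (hh : 0 < bh) :
    blk_to_collision d bw bh tbl = (pvRows d tbl bw 0 bh, bw * 2, bh * 2) := by
  obtain ⟨w, rfl⟩ : ∃ w : Nat, bw = (w : Int) := ⟨bw.toNat, (Int.toNat_of_nonneg hw.le).symm⟩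
  obtain ⟨h, rfl⟩ : ∃ h : Nat, bh = (h : Int) := ⟨bh.toNat, (Int.toNat_of_nonneg hh.le).symm⟩
  unfold blk_to_collision
  refine congrArg (fun o => (o, (w : Int) * 2, (h : Int) * 2)) ?_
  have h0 : PySem.List.pyRepeat [(0 : Int)] ((w : Int) * 2 * ((h : Int) * 2)) = List.replicate (4 * w * h) 0 := by
    rw [PySem.List.pyRepeat_singleton]
    congr 1
    have : (w : Int) * 2 * ((h : Int) * 2) = ((4 * w * h : Nat) : Int) := by push_cast; ring
    rw [this, Int.toNat_natCast]
  rw [h0]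
  have hout := pvOuter d tbl w h h 0 (by omega) [] (by simp)
  simp only [Nat.cast_zero, List.nil_append] at hout
  exact hout

-- ===== VERDICT (by name: the statement is the Claim_ definition above) =====
theorem blk_to_collision_spec : Claim_equal_blk_to_collision := by
  intro d bw bh tbl _hdom hpre
  unfold Spec_blk_to_collision
  rw [pvB_eq]
  by_cases hw : 0 < bw
  · by_cases hh : 0 < bh
    · rw [pvA_eq_pos d bw bh tbl hw hh]
    · -- no block rows: both sides carry the empty tile array
      unfold blk_to_collision
      refine congrArg (fun o => (o, bw * 2, bh * 2)) ?_
      rw [PySem.List.pyRange_one_eq_nil (show bh ≤ (0 : Int) by omega), List.foldl_nil,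
          PySem.List.pyRepeat_singleton]
      have hle : bw * 2 * (bh * 2) ≤ 0 := by nlinarith
      rw [show (bw * 2 * (bh * 2)).toNat = 0 by omega]
      unfold pvRows
      rw [PySem.List.pyRange_one_eq_nil (show bh ≤ (0 : Int) by omega)]
      simp
  · -- no block columns: every row is empty on both sides
    unfold blk_to_collision
    refine congrArg (fun o => (o, bw * 2, bh * 2)) ?_
    have hrow : ∀ (out : List Int) (by_ : Int),
        (PySem.List.pyRange 0 bw 1).foldl (pvStepA d tbl bw (bw * 2) by_) out = out := by
      intro out by_
      rw [PySem.List.pyRange_one_eq_nil (show bw ≤ (0 : Int) by omega), List.foldl_nil]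
    calc (PySem.List.pyRange 0 bh 1).foldl
            (fun out by_ => (PySem.List.pyRange 0 bw 1).foldl (pvStepA d tbl bw (bw * 2) by_) out)
            (PySem.List.pyRepeat [(0 : Int)] (bw * 2 * (bh * 2)))
        = PySem.List.pyRepeat [(0 : Int)] (bw * 2 * (bh * 2)) := by
          rw [PySem.List.foldl_congr_mem _ _ (fun out _ => out) _ (fun acc x _ => hrow acc x),
              PySem.List.foldl_ignore]
      _ = pvRows d tbl bw 0 bh := by
          rw [PySem.List.pyRepeat_singleton]
          have hle : bw * 2 * (bh * 2) ≤ 0 := by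
            rcases hpre.1 with h
            by_cases hbh : 0 ≤ bh
            · nlinarith
            · have hbw0 : bw = 0 := by omega
              simp [hbw0]
          rw [show (bw * 2 * (bh * 2)).toNat = 0 by omega]
          unfold pvRows pvNseg pvSseg
          simp [PySem.List.pyRange_one_eq_nil (show bw ≤ (0 : Int) by omega)]
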